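-- pv_equiv track=rewrite | github.com/posl/comment_recommendation | script/mod_gen/4_time/en/252_D/4.py | solve
-- ===== SOURCE A (Python) =====
-- def solve(n, a):
--     ans = 0
--     b = [0] * (n + 1)
--     c = [0] * (n + 1)
--     for i in range(n):
--         ans += c[a[i]]
--         c[a[i]] += b[a[i]]
--         b[a[i]] += 1
--     return ans
-- ===== SOURCE B (Python) =====
-- def solve(n, a):
--     # count-then-closed-form: build the same size-(n+1) frequency table, then sum C(m,3)
--     b = [0] * (n + 1)
--     for i in range(n):
--         b[a[i]] += 1
--     return sum(m * (m - 1) * (m - 2) // 6 for m in b)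
-- ===== Notes on version B (the rewrite author's own statement) =====
-- stated objective: simpler
-- what changed: Replaces A's incremental maintenance of running pair-counts (arrays b and c updated per element, accumulating ans += c[a[i]]) with a single frequency pass over the same size-(n+1) table followed by the closed-form sum of m*(m-1)*(m-2)//6 over the counts.
import Mathlib
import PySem

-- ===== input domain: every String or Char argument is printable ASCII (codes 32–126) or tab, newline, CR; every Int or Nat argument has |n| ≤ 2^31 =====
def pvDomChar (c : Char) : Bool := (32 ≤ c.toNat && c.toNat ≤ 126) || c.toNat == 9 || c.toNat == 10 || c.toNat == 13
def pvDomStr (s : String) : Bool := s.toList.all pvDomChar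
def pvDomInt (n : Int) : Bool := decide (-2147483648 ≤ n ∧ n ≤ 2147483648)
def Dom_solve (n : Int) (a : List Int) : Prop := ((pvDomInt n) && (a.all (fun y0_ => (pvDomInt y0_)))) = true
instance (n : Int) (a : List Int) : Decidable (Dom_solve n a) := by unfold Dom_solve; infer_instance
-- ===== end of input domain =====

-- B replaces A's running pair-count bookkeeping by one frequency pass plus a closed-form
-- sum of m*(m-1)*(m-2)//6 over the counts (same cost; simpler decomposition).

-- ===== PORT A =====
-- loop body of A: ans += c[a[i]]; c[a[i]] += b[a[i]]; b[a[i]] += 1   (state = (ans, b, c))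
def stepA (a : List Int) (st : Int × List Int × List Int) (i : Int) : Int × List Int × List Int :=
  let ai := PySem.List.pyGetD a i 0
  let ans := st.1 + PySem.List.pyGetD st.2.2 ai 0
  let c := PySem.List.pySetD st.2.2 ai (PySem.List.pyGetD st.2.2 ai 0 + PySem.List.pyGetD st.2.1 ai 0)
  let b := PySem.List.pySetD st.2.1 ai (PySem.List.pyGetD st.2.1 ai 0 + 1)
  (ans, b, c)

def solve (n : Int) (a : List Int) : Int :=
  ((PySem.List.pyRange 0 n 1).foldl (stepA a)
    (0, List.replicate (n + 1).toNat 0, List.replicate (n + 1).toNat 0)).1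

-- ===== PORT B =====
-- loop body of B's counting pass: b[a[i]] += 1
def stepB (a : List Int) (b : List Int) (i : Int) : List Int :=
  let ai := PySem.List.pyGetD a i 0
  PySem.List.pySetD b ai (PySem.List.pyGetD b ai 0 + 1)

def solve_alt (n : Int) (a : List Int) : Int :=
  ((PySem.List.pyRange 0 n 1).foldl (stepB a) (List.replicate (n + 1).toNat 0)).foldl
    (fun acc m => acc + PySem.Int.floordiv (m * (m - 1) * (m - 2)) 6) 0

-- ===== PRECONDITION & SPEC =====
-- Pre_ excludes exactly the inputs where A raises: IndexError from a[i] when the list is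
-- shorter than n, or from b[a[i]]/c[a[i]] when some used value lies outside [-(n+1), n].
def Pre_solve (n : Int) (a : List Int) : Prop :=
  n ≤ (a.length : Int) ∧ ∀ x ∈ a.take n.toNat, -(n + 1) ≤ x ∧ x < n + 1
instance (n : Int) (a : List Int) : Decidable (Pre_solve n a) := by unfold Pre_solve; infer_instance

def pvWitness_solve : Int × List Int := (3, [1, 2, 1])

def Spec_solve (n : Int) (a : List Int) (out : Int) : Prop := out = solve_alt n a
instance (n : Int) (a : List Int) (out : Int) : Decidable (Spec_solve n a out) := by unfold Spec_solve; infer_instance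

-- ===== CLAIM (what is proved, stated in full; the proofs are below) =====
def Claim_equal_solve : Prop := ∀ (n : Int) (a : List Int), Dom_solve n a → Pre_solve n a → Spec_solve n a (solve n a)

-- ===== LEMMAS AND PROOFS =====

-- C(m,2) and C(m,3) as A/B compute them
def t2 (m : Int) : Int := PySem.Int.floordiv (m * (m - 1)) 2
def t3 (m : Int) : Int := PySem.Int.floordiv (m * (m - 1) * (m - 2)) 6

-- value-level loop bodies (the index fold is reduced to these below)
def stepVA (st : Int × List Int × List Int) (x : Int) : Int × List Int × List Int :=
  let ans := st.1 + PySem.List.pyGetD st.2.2 x 0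
  let c := PySem.List.pySetD st.2.2 x (PySem.List.pyGetD st.2.2 x 0 + PySem.List.pyGetD st.2.1 x 0)
  let b := PySem.List.pySetD st.2.1 x (PySem.List.pyGetD st.2.1 x 0 + 1)
  (ans, b, c)

def stepVB (b : List Int) (x : Int) : List Int :=
  PySem.List.pySetD b x (PySem.List.pyGetD b x 0 + 1)

theorem stepA_eq (a : List Int) : stepA a = fun st i => stepVA st (PySem.List.pyGetD a i 0) := rfl
theorem stepB_eq (a : List Int) : stepB a = fun b i => stepVB b (PySem.List.pyGetD a i 0) := rfl

theorem dvd2_consec (m : Int) : 2 ∣ m * (m - 1) := by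
  rcases Int.even_or_odd m with ⟨k, hk⟩ | ⟨k, hk⟩
  · exact ⟨k * (m - 1), by subst hk; ring⟩
  · exact ⟨m * k, by subst hk; ring⟩

theorem dvd6_consec (m : Int) : 6 ∣ m * (m - 1) * (m - 2) := by
  obtain ⟨q, r, hr, hm⟩ : ∃ q r, (r = 0 ∨ r = 1 ∨ r = 2 ∨ r = 3 ∨ r = 4 ∨ r = 5) ∧ m = 6 * q + r :=
    ⟨m / 6, m % 6, by omega, by omega⟩
  subst hm
  rcases hr with rfl | rfl | rfl | rfl | rfl | rfl
  · exact ⟨q * (6 * q - 1) * (6 * q - 2), by ring⟩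
  · exact ⟨(6 * q + 1) * q * (6 * q - 1), by ring⟩
  · exact ⟨(3 * q + 1) * (6 * q + 1) * (2 * q), by ring⟩
  · exact ⟨(2 * q + 1) * (3 * q + 1) * (6 * q + 1), by ring⟩
  · exact ⟨(3 * q + 2) * (2 * q + 1) * (6 * q + 2), by ring⟩
  · exact ⟨(6 * q + 5) * (3 * q + 2) * (2 * q + 1), by ring⟩

theorem fdiv_exact {x k c : Int} (hk : 0 < k) (h : x = k * c) : PySem.Int.floordiv x k = c := by
  rw [PySem.Int.floordiv_eq_ediv_of_pos hk, h, Int.mul_ediv_cancel_left _ (by omega)]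

theorem t2_succ (m : Int) : t2 (m + 1) = t2 m + m := by
  obtain ⟨c, hc⟩ := dvd2_consec m
  have h1 : t2 m = c := fdiv_exact (by norm_num) hc
  have h2 : t2 (m + 1) = c + m := fdiv_exact (by norm_num) (by linear_combination hc)
  rw [h1, h2]

theorem t3_succ (m : Int) : t3 (m + 1) = t3 m + t2 m := by
  obtain ⟨c, hc⟩ := dvd6_consec m
  obtain ⟨d, hd⟩ := dvd2_consec m
  have h1 : t3 m = c := fdiv_exact (by norm_num) hc
  have h2 : t2 m = d := fdiv_exact (by norm_num) hd
  have h3 : t3 (m + 1) = c + d := fdiv_exact (by norm_num) (by linear_combination hc + 3 * hd)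
  rw [h1, h2, h3]

theorem t2_zero : t2 0 = 0 := by
  have : t2 0 = 0 := fdiv_exact (by norm_num) (by ring)
  exact this

theorem t3_zero : t3 0 = 0 := fdiv_exact (by norm_num) (by ring)

theorem idx_some {len : Nat} {x : Int} (h1 : -(len : Int) ≤ x) (h2 : x < len) :
    ∃ k, PySem.List.pyIdx? len x = some k ∧ k < len := by
  by_cases h3 : 0 ≤ x
  · refine ⟨x.toNat, ?_, by omega⟩
    simp [PySem.List.pyIdx?, h3, h2]
  · refine ⟨len - (-x).toNat, ?_, by omega⟩
    simp [PySem.List.pyIdx?, h3, h1]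

theorem getD_of_idx {l : List Int} {x : Int} {k : Nat}
    (hk : PySem.List.pyIdx? l.length x = some k) (d : Int) :
    PySem.List.pyGetD l x d = l.getD k d := by
  simp [PySem.List.pyGetD, PySem.List.pyGet?, hk, List.getD_eq_getElem?_getD]

theorem setD_of_idx {l : List Int} {x : Int} {k : Nat}
    (hk : PySem.List.pyIdx? l.length x = some k) (v : Int) :
    PySem.List.pySetD l x v = l.set k v := by
  simp [PySem.List.pySetD, PySem.List.pySet?, hk]

theorem sum_set_int (l : List Int) (k : Nat) (v : Int) (h : k < l.length) :
    (l.set k v).sum = l.sum - l.getD k 0 + v := by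
  induction l generalizing k with
  | nil => simp at h
  | cons y ys ih =>
    cases k with
    | zero => simp [List.set, List.sum_cons]; ring
    | succ k =>
      have hk : k < ys.length := by simpa using h
      simp [List.set, List.sum_cons, List.getD_cons_succ, ih k hk]
      ring

theorem foldl_range_take {β : Type} (f : β → Int → β) (a : List Int) (m : Nat)
    (hm : m ≤ a.length) (init : β) :
    (PySem.List.pyRange 0 (m : Int) 1).foldl (fun st i => f st (PySem.List.pyGetD a i 0)) init
      = (a.take m).foldl f init := by
  induction m generalizing init with
  | zero => simp [PySem.List.pyRange_one_eq_nil (by omega : (0:Int) ≤ 0)]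
  | succ m ih =>
    have hm' : m ≤ a.length := by omega
    have hml : m < a.length := by omega
    have hcast : ((m + 1 : Nat) : Int) = (m : Int) + 1 := by push_cast; ring
    rw [hcast, PySem.List.pyRange_one_succ_right (by positivity), List.foldl_append,
        ih hm']
    have htake : a.take (m + 1) = a.take m ++ [a[m]] := by
      rw [List.take_succ, List.getElem?_eq_getElem hml]
      rfl
    rw [htake, List.foldl_append]
    simp [PySem.List.pyGetD_natCast, List.getD_eq_getElem, hml]

theorem foldl_range_take' {β : Type} (f : β → Int → β) (a : List Int) (n : Int)
    (hn : 0 ≤ n) (hm : n ≤ (a.length : Int)) (init : β) :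
    (PySem.List.pyRange 0 n 1).foldl (fun st i => f st (PySem.List.pyGetD a i 0)) init
      = (a.take n.toNat).foldl f init := by
  have h := foldl_range_take f a n.toNat (by omega) init
  rwa [Int.toNat_of_nonneg hn] at h

theorem map_t2_replicate (sz : Nat) : (List.replicate sz (0 : Int)).map t2 = List.replicate sz 0 := by
  simp [List.map_replicate, t2_zero]

theorem sum_map_t3_replicate (sz : Nat) : ((List.replicate sz (0 : Int)).map t3).sum = 0 := by
  simp [List.map_replicate, t3_zero]

theorem loopA_eq (xs : List Int) (b : List Int) (ans : Int)
    (h : ∀ x ∈ xs, -(b.length : Int) ≤ x ∧ x < b.length) :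
    (xs.foldl stepVA (ans, b, b.map t2)).1
      = ans + ((xs.foldl stepVB b).map t3).sum - (b.map t3).sum := by
  induction xs generalizing b ans with
  | nil => simp
  | cons x rest ih =>
    obtain ⟨hx1, hx2⟩ := h x (List.mem_cons_self ..)
    obtain ⟨k, hk, hklt⟩ := idx_some hx1 hx2
    have hkm : PySem.List.pyIdx? (b.map t2).length x = some k := by
      rwa [List.length_map]
    have hbk : b.getD k 0 = b[k] := List.getD_eq_getElem b 0 hklt
    have hmapget : (b.map t2).getD k 0 = t2 b[k] := by
      have hk' : k < (b.map t2).length := by simpa using hklt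
      rw [List.getD_eq_getElem _ 0 hk']
      simp
    have hsetc : (b.map t2).set k (t2 b[k] + b[k]) = (b.set k (b[k] + 1)).map t2 := by
      rw [List.map_set]
      congr 1
      rw [t2_succ]
    have hstepA : stepVA (ans, b, b.map t2) x
        = (ans + t2 b[k], b.set k (b[k] + 1), (b.set k (b[k] + 1)).map t2) := by
      simp only [stepVA, getD_of_idx hk, getD_of_idx hkm, setD_of_idx hk, setD_of_idx hkm,
        hbk, hmapget]
      rw [hsetc]
    have hstepB : stepVB b x = b.set k (b[k] + 1) := by
      simp only [stepVB, getD_of_idx hk, setD_of_idx hk, hbk]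
    have hlen : (b.set k (b[k] + 1)).length = b.length := List.length_set ..
    have hrest : ∀ y ∈ rest, -((b.set k (b[k] + 1)).length : Int) ≤ y ∧ y < (b.set k (b[k] + 1)).length := by
      intro y hy
      rw [hlen]
      exact h y (List.mem_cons_of_mem _ hy)
    have hsum : ((b.set k (b[k] + 1)).map t3).sum = (b.map t3).sum + t2 b[k] := by
      rw [List.map_set, sum_set_int _ _ _ (by simpa using hklt)]
      have : (b.map t3).getD k 0 = t3 b[k] := by
        have hk' : k < (b.map t3).length := by simpa using hklt
        rw [List.getD_eq_getElem _ 0 hk']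
        simp
      rw [this, t3_succ]
      ring
    rw [List.foldl_cons, List.foldl_cons, hstepA, hstepB, ih _ _ hrest, hsum]
    ring

-- ===== VERDICT (by name: the statement is the Claim_ definition above) =====
theorem solve_spec : Claim_equal_solve := by
  intro n a _ hpre
  obtain ⟨hlen, hvals⟩ := hpre
  unfold Spec_solve solve solve_alt
  have hfun : (fun (acc m : Int) => acc + PySem.Int.floordiv (m * (m - 1) * (m - 2)) 6)
      = (fun acc m => acc + t3 m) := rfl
  by_cases hn : 0 < n
  · have hsz : (((n + 1).toNat : Nat) : Int) = n + 1 := Int.toNat_of_nonneg (by omega)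
    rw [stepA_eq, stepB_eq, foldl_range_take' stepVA a n (le_of_lt hn) hlen,
        foldl_range_take' stepVB a n (le_of_lt hn) hlen]
    have hb0 : ∀ x ∈ a.take n.toNat,
        -((List.replicate (n + 1).toNat (0 : Int)).length : Int) ≤ x
          ∧ x < (List.replicate (n + 1).toNat (0 : Int)).length := by
      intro x hx
      rw [List.length_replicate, hsz]
      exact hvals x hx
    have hinit : (0, List.replicate (n + 1).toNat (0 : Int), List.replicate (n + 1).toNat (0 : Int))
        = ((0 : Int), List.replicate (n + 1).toNat (0 : Int),
            (List.replicate (n + 1).toNat (0 : Int)).map t2) := by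
      rw [map_t2_replicate]
    rw [hinit, loopA_eq _ _ _ hb0, sum_map_t3_replicate, hfun,
        PySem.List.foldl_add _ t3 0]
    ring
  · have hrange : PySem.List.pyRange 0 n 1 = [] := PySem.List.pyRange_one_eq_nil (by omega)
    rw [hrange]
    simp only [List.foldl_nil]
    rw [hfun, PySem.List.foldl_add _ t3 0, sum_map_t3_replicate]
    norm_num
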